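-- pv_equiv track=rewrite | github.com/quoryl/ciphers-implementations | Huffman/lempel_ziv.py | lz78_encode
-- ===== SOURCE A (Python) =====
-- def lz78_encode(input_string):
--     dictionary = {"": 0}
--     dictionary_size = 1
--     index_bits = 1
--     char_bits = 5
--     encoded_bits = ""
--     current_phrase = ""
--
--     for char in input_string:
--         current_phrase += char
--         if current_phrase not in dictionary:
--             prefix_index = dictionary[current_phrase[:-1]]
--             char_code = ord(current_phrase[-1]) - ord('A')
--
--             index_binary = f"{prefix_index:0{index_bits}b}"
--             char_binary = f"{char_code:0{char_bits}b}"
--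
--             encoded_bits += index_binary + char_binary
--
--             dictionary[current_phrase] = dictionary_size
--             dictionary_size += 1
--
--             # Check if we need to increase index bits
--             if dictionary_size == (1 << index_bits):
--                 index_bits += 1
--
--             # Reset current phrase, as it is now in the dictionary
--             current_phrase = ""
--
--     # Handle any remaining phrase
--     # This is necessary if the input string ends with a phrase that is in the dictionary
--     if current_phrase:
--         prefix_index = dictionary[current_phrase[:-1]]
--         char_code = ord(current_phrase[-1]) - ord('A')
--         index_binary = f"{prefix_index:0{index_bits}b}"
--         char_binary = f"{char_code:0{char_bits}b}"
--         encoded_bits += index_binary + char_binary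
--
--     return encoded_bits
-- ===== SOURCE B (Python) =====
-- def lz78_encode(input_string):
--     trie = {}  # (node_id, char) -> node_id; root ("") is node 0
--     next_id = 1
--     index_bits = 1
--     char_bits = 5
--     encoded_bits = ""
--     node = 0
--     parent = 0
--     last = ""
--     for char in input_string:
--         key = (node, char)
--         if key in trie:
--             parent = node
--             last = char
--             node = trie[key]
--         else:
--             encoded_bits += f"{node:0{index_bits}b}" + f"{ord(char) - ord('A'):0{char_bits}b}"
--             trie[key] = next_id
--             next_id += 1
--             if next_id == (1 << index_bits):
--                 index_bits += 1
--             node = 0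
--     if node:
--         encoded_bits += f"{parent:0{index_bits}b}" + f"{ord(last) - ord('A'):0{char_bits}b}"
--     return encoded_bits
-- ===== Notes on version B (the rewrite author's own statement) =====
-- stated objective: alternative
-- what changed: Replaces the dictionary of phrase strings (rebuilt and sliced each step) by an explicit trie encoded as a dict keyed by (node_id, char), walked one node per character; the tail phrase is emitted from the tracked (parent, last-char) instead of string slicing.
import Mathlib
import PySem

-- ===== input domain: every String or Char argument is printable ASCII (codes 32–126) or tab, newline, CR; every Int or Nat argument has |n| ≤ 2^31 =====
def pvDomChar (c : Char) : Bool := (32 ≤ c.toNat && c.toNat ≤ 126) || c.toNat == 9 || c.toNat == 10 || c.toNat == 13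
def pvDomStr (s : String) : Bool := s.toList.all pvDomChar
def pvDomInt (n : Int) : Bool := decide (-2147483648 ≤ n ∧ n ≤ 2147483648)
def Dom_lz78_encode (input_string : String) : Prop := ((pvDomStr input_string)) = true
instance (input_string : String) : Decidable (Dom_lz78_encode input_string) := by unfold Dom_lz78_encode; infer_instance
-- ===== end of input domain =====

-- B replaces A's dictionary of phrase strings by an explicit trie stored as a dict keyed by
-- (node_id, char), walked one node per input character (an alternative algorithm, same result).

-- Shared formatting helper: f"{n:0{w}b}" = format(n, 'b') zero-filled to width w (sign kept in
-- front), exactly as both Pythons format their emitted fields.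
def pvBinNat (n : Nat) : List Char :=
  if h : n = 0 then [] else pvBinNat (n / 2) ++ [if n % 2 = 1 then '1' else '0']
decreasing_by exact Nat.div_lt_self (Nat.pos_of_ne_zero h) (by omega)

def pvBin (n : Int) : List Char :=
  if n < 0 then '-' :: pvBinNat n.natAbs else if n = 0 then ['0'] else pvBinNat n.toNat

def pvFmt (n w : Int) : List Char := PySem.Chars.zfill (pvBin n) w

-- ===== PORT A =====
structure LZAState where
  d : PySem.Dict (List Char) Int
  size : Int
  ibits : Int
  bits : List Char
  cur : List Char

def lz78StepA (st : LZAState) (c : Char) : LZAState :=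
  let cur' := st.cur ++ [c]
  if st.d.contains cur' = false then
    -- dictionary[current_phrase[:-1]]: the key is always present (the matched prefix), so getD
    let pidx := st.d.getD (PySem.Chars.slice cur' none (some (-1))) 0
    -- current_phrase[-1]: cur' is nonempty, so pyGet? is always `some`; getD 'A' is unreachable
    let ccode := (((PySem.Chars.pyGet? cur' (-1)).getD 'A').toNat : Int) - 65
    let size' := st.size + 1
    { d := st.d.insert cur' st.size
      size := size'
      ibits := if size' = (1 <<< st.ibits.toNat : Int) then st.ibits + 1 else st.ibits
      bits := st.bits ++ (pvFmt pidx st.ibits ++ pvFmt ccode 5)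
      cur := [] }
  else
    { st with cur := cur' }

def lz78_encode (input_string : String) : String :=
  let st := input_string.toList.foldl lz78StepA
    { d := PySem.Dict.ofList [([], 0)], size := 1, ibits := 1, bits := [], cur := [] }
  if st.cur ≠ [] then
    String.ofList (st.bits ++
      (pvFmt (st.d.getD (PySem.Chars.slice st.cur none (some (-1))) 0) st.ibits ++
       pvFmt ((((PySem.Chars.pyGet? st.cur (-1)).getD 'A').toNat : Int) - 65) 5))
  else
    String.ofList st.bits

-- ===== PORT B =====
structure LZBState where
  trie : PySem.Dict (Int × Char) Int
  nid : Int
  ibits : Int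
  bits : List Char
  node : Int
  parent : Int
  last : Char

def lz78StepB (st : LZBState) (c : Char) : LZBState :=
  if st.trie.contains (st.node, c) = true then
    { st with parent := st.node, last := c, node := st.trie.getD (st.node, c) 0 }
  else
    let nid' := st.nid + 1
    { trie := st.trie.insert (st.node, c) st.nid
      nid := nid'
      ibits := if nid' = (1 <<< st.ibits.toNat : Int) then st.ibits + 1 else st.ibits
      bits := st.bits ++ (pvFmt st.node st.ibits ++ pvFmt ((c.toNat : Int) - 65) 5)
      node := 0
      parent := st.parent
      last := st.last }

def lz78_encode_alt (input_string : String) : String :=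
  -- Python's `last = ""` is only read after a descent has set it to a char; 'A' is an arbitrary seed
  let st := input_string.toList.foldl lz78StepB
    { trie := PySem.Dict.empty, nid := 1, ibits := 1, bits := [], node := 0, parent := 0, last := 'A' }
  if st.node ≠ 0 then
    String.ofList (st.bits ++ (pvFmt st.parent st.ibits ++ pvFmt ((st.last.toNat : Int) - 65) 5))
  else
    String.ofList st.bits

-- ===== PRECONDITION & SPEC =====
def Spec_lz78_encode (input_string : String) (out : String) : Prop := out = lz78_encode_alt input_string
instance (input_string : String) (out : String) : Decidable (Spec_lz78_encode input_string out) := by unfold Spec_lz78_encode; infer_instance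

-- ===== CLAIM (what is proved, stated in full; the proofs are below) =====
def Claim_equal_lz78_encode : Prop := ∀ (input_string : String), Dom_lz78_encode input_string → Spec_lz78_encode input_string (lz78_encode input_string)

-- ===== LEMMAS AND PROOFS =====

-- The coupling invariant: A's phrase dictionary and B's trie describe the same LZ78 state.
def LZInv (a : LZAState) (b : LZBState) : Prop :=
  a.size = b.nid ∧ a.ibits = b.ibits ∧ a.bits = b.bits ∧
  a.d.contains a.cur = true ∧ a.d.getD a.cur 0 = b.node ∧
  (a.cur ≠ [] → b.parent = a.d.getD a.cur.dropLast 0 ∧ a.cur.getLast? = some b.last) ∧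
  a.d.contains [] = true ∧ a.d.getD [] 0 = 0 ∧
  (∀ p, a.d.contains p = true → 0 ≤ a.d.getD p 0 ∧ a.d.getD p 0 < a.size) ∧
  (∀ p q, a.d.contains p = true → a.d.contains q = true →
     a.d.getD p 0 = a.d.getD q 0 → p = q) ∧
  (∀ p, a.d.contains p = true → p ≠ [] → a.d.contains p.dropLast = true) ∧
  (∀ k : Int × Char, b.trie.contains k = true → 0 ≤ k.1 ∧ k.1 < a.size) ∧
  (∀ p c, a.d.contains p = true →
     a.d.contains (p ++ [c]) = b.trie.contains (a.d.getD p 0, c) ∧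
     (a.d.contains (p ++ [c]) = true →
       b.trie.getD (a.d.getD p 0, c) 0 = a.d.getD (p ++ [c]) 0))

lemma pyGet_concat_neg_one (xs : List Char) (x : Char) :
    PySem.List.pyGet? (xs ++ [x]) (-1) = some x := by
  simp [PySem.List.pyGet?, PySem.List.pyIdx?]

lemma lzStep_inv (a : LZAState) (b : LZBState) (c : Char) (h : LZInv a b) :
    LZInv (lz78StepA a c) (lz78StepB b c) := by
  obtain ⟨hsz, hib, hbits, hcur, hnode, htail, hnil, hnil0, hbound, hinj, hpc, htb, hcorr⟩ := h
  have hbr : a.d.contains (a.cur ++ [c]) = b.trie.contains (b.node, c) := by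
    rw [← hnode]; exact (hcorr a.cur c hcur).1
  by_cases hc : a.d.contains (a.cur ++ [c]) = true
  · -- phrase already in the dictionary: A extends cur, B descends
    have hct : b.trie.contains (b.node, c) = true := hbr ▸ hc
    simp only [lz78StepA, lz78StepB, hc, hct, Bool.true_eq_false, if_true, if_false]
    refine ⟨hsz, hib, hbits, hc, ?_, ?_, hnil, hnil0, hbound, hinj, hpc, htb, hcorr⟩
    · rw [← hnode]; exact ((hcorr a.cur c hcur).2 hc).symm
    · intro _
      constructor
      · simp only [List.dropLast_concat]; exact hnode.symm
      · simp
  · -- new phrase: A inserts cur++[c], B inserts (node, c)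
    have hcf : a.d.contains (a.cur ++ [c]) = false := by
      cases hx : a.d.contains (a.cur ++ [c]) with
      | false => rfl
      | true => exact absurd hx hc
    have hctf : b.trie.contains (b.node, c) = false := hbr ▸ hcf
    have hne : a.cur ++ [c] ≠ [] := by simp
    have hdc : ∀ p : List Char, ((a.d.insert (a.cur ++ [c]) a.size).contains p = true) ↔
        (p = a.cur ++ [c] ∨ a.d.contains p = true) := by
      intro p; rw [PySem.Dict.contains_insert]; simp
    have hdg : ∀ p : List Char, (a.d.insert (a.cur ++ [c]) a.size).getD p 0 =
        if p = a.cur ++ [c] then a.size else a.d.getD p 0 := by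
      intro p; rw [PySem.Dict.getD_insert]
    have htc : ∀ k : Int × Char, ((b.trie.insert (b.node, c) b.nid).contains k = true) ↔
        (k = (b.node, c) ∨ b.trie.contains k = true) := by
      intro k; rw [PySem.Dict.contains_insert]; simp
    have htg : ∀ k : Int × Char, (b.trie.insert (b.node, c) b.nid).getD k 0 =
        if k = (b.node, c) then b.nid else b.trie.getD k 0 := by
      intro k; rw [PySem.Dict.getD_insert]
    have hszpos : 0 < a.size := by
      have h2 := (hbound [] hnil).2; rw [hnil0] at h2; exact h2
    have hfreshA : ∀ p : List Char, a.d.contains p = true → p ≠ a.cur ++ [c] := by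
      intro p hp hpe; rw [hpe, hcf] at hp; exact absurd hp (by simp)
    have hpidx : a.d.getD (PySem.Chars.slice (a.cur ++ [c]) none (some (-1))) 0 = b.node := by
      rw [PySem.Chars.slice_eq_listSlice, PySem.List.slice_to_neg_one, List.dropLast_concat, hnode]
    have hccode : (PySem.List.pyGet? (a.cur ++ [c]) (-1)).getD 'A' = c := by
      rw [pyGet_concat_neg_one]; rfl
    simp only [lz78StepA, lz78StepB, hcf, hctf, Bool.false_eq_true, if_true, if_false]
    refine ⟨by dsimp only; omega, by dsimp only; rw [hsz, hib], ?_, ?_, ?_, ?_, ?_, ?_, ?_, ?_, ?_, ?_, ?_⟩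
    · simp only [PySem.Chars.pyGet?_eq_listPyGet?]
      rw [hbits, hib, hpidx, hccode]
    · exact (hdc []).2 (Or.inr hnil)
    · rw [hdg [], if_neg (by simp), hnil0]
    · intro hx; exact absurd rfl hx
    · exact (hdc []).2 (Or.inr hnil)
    · rw [hdg [], if_neg (by simp)]; exact hnil0
    · -- bounds
      dsimp only
      intro p hp
      rw [hdg p]
      by_cases hpe : p = a.cur ++ [c]
      · rw [if_pos hpe]; omega
      · rw [if_neg hpe]
        rcases (hdc p).1 hp with hx | hpold
        · exact absurd hx hpe
        · have := hbound p hpold; omega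
    · -- injectivity
      dsimp only
      intro p q hp hq hpq
      rw [hdg p, hdg q] at hpq
      by_cases hpe : p = a.cur ++ [c] <;> by_cases hqe : q = a.cur ++ [c]
      · rw [hpe, hqe]
      · rw [if_pos hpe, if_neg hqe] at hpq
        rcases (hdc q).1 hq with hx | hqold
        · exact absurd hx hqe
        · have := hbound q hqold; omega
      · rw [if_neg hpe, if_pos hqe] at hpq
        rcases (hdc p).1 hp with hx | hpold
        · exact absurd hx hpe
        · have := hbound p hpold; omega
      · rw [if_neg hpe, if_neg hqe] at hpq
        rcases (hdc p).1 hp with hx | hpold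
        · exact absurd hx hpe
        · rcases (hdc q).1 hq with hx | hqold
          · exact absurd hx hqe
          · exact hinj p q hpold hqold hpq
    · -- prefix closure
      intro p hp hpne
      rcases (hdc p).1 hp with hpe | hpold
      · rw [hpe, List.dropLast_concat]; exact (hdc a.cur).2 (Or.inr hcur)
      · exact (hdc _).2 (Or.inr (hpc p hpold hpne))
    · -- trie key bounds
      dsimp only
      intro k hk
      rcases (htc k).1 hk with hke | hkold
      · have hb := hbound a.cur hcur; rw [hnode] at hb
        rw [hke]; exact ⟨hb.1, by omega⟩
      · have := htb k hkold; omega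
    · -- correspondence
      intro p c2 hp
      rw [hdg p]
      by_cases hpe : p = a.cur ++ [c]
      · -- p is the freshly inserted phrase cur ++ [c]
        rw [if_pos hpe]
        have hfresh : a.d.contains (p ++ [c2]) = false := by
          cases hx : a.d.contains (p ++ [c2]) with
          | false => rfl
          | true =>
            have hy := hpc _ hx (by simp)
            rw [List.dropLast_concat, hpe] at hy
            rw [hy] at hcf; exact absurd hcf (by simp)
        have hL : (a.d.insert (a.cur ++ [c]) a.size).contains (p ++ [c2]) = false := by
          cases hx : (a.d.insert (a.cur ++ [c]) a.size).contains (p ++ [c2]) with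
          | false => rfl
          | true =>
            rcases (hdc _).1 hx with hxx | hxold
            · rw [hpe] at hxx; exact absurd hxx (by simp)
            · rw [hxold] at hfresh; exact absurd hfresh (by simp)
        have hR : (b.trie.insert (b.node, c) b.nid).contains (a.size, c2) = false := by
          cases hx : (b.trie.insert (b.node, c) b.nid).contains (a.size, c2) with
          | false => rfl
          | true =>
            rcases (htc _).1 hx with hxx | hxold
            · have hb := (hbound a.cur hcur).2; rw [hnode] at hb
              have h1 : a.size = b.node := congrArg Prod.fst hxx
              omega
            · have := (htb _ hxold).2; simp only at this; omega
        rw [hL, hR]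
        exact ⟨rfl, by intro hx; exact absurd hx (by simp)⟩
      · -- p was already in the dictionary
        rw [if_neg hpe]
        rcases (hdc p).1 hp with hx | hpold
        · exact absurd hx hpe
        by_cases hext : p ++ [c2] = a.cur ++ [c]
        · -- the extension IS the new phrase: p = cur, c2 = c
          have h1 := List.append_inj' hext rfl
          have hp1 : p = a.cur := h1.1
          have hp2 : c2 = c := by simpa using h1.2
          rw [hp1, hp2, hnode]
          constructor
          · have hL : (a.d.insert (a.cur ++ [c]) a.size).contains (a.cur ++ [c]) = true :=
              (hdc _).2 (Or.inl rfl)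
            have hR : (b.trie.insert (b.node, c) b.nid).contains (b.node, c) = true :=
              (htc _).2 (Or.inl rfl)
            rw [hL, hR]
          · intro _
            rw [htg, if_pos rfl, hdg, if_pos rfl, hsz]
        · -- untouched pair
          have hkne : ((a.d.getD p 0 : Int), c2) ≠ (b.node, c) := by
            intro hke
            have h1 : a.d.getD p 0 = b.node := congrArg Prod.fst hke
            have h2 : c2 = c := congrArg Prod.snd hke
            rw [← hnode] at h1
            have h3 := hinj p a.cur hpold hcur h1
            exact hext (by rw [h3, h2])
          have hCL : (a.d.insert (a.cur ++ [c]) a.size).contains (p ++ [c2]) = a.d.contains (p ++ [c2]) := by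
            cases hx : a.d.contains (p ++ [c2]) with
            | true => exact (hdc _).2 (Or.inr hx)
            | false =>
              cases hy : (a.d.insert (a.cur ++ [c]) a.size).contains (p ++ [c2]) with
              | false => rfl
              | true =>
                rcases (hdc _).1 hy with hxx | hxold
                · exact absurd hxx hext
                · rw [hxold] at hx; exact absurd hx (by simp)
          have hCR : (b.trie.insert (b.node, c) b.nid).contains (a.d.getD p 0, c2) = b.trie.contains (a.d.getD p 0, c2) := by
            cases hx : b.trie.contains (a.d.getD p 0, c2) with
            | true => exact (htc _).2 (Or.inr hx)
            | false =>
              cases hy : (b.trie.insert (b.node, c) b.nid).contains (a.d.getD p 0, c2) with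
              | false => rfl
              | true =>
                rcases (htc _).1 hy with hxx | hxold
                · exact absurd hxx hkne
                · rw [hxold] at hx; exact absurd hx (by simp)
          rw [hCL, hCR]
          constructor
          · exact (hcorr p c2 hpold).1
          · intro hcont
            rw [htg, if_neg hkne, hdg, if_neg hext]
            exact (hcorr p c2 hpold).2 hcont

lemma lzFoldl_inv (cs : List Char) (a : LZAState) (b : LZBState) (h : LZInv a b) :
    LZInv (cs.foldl lz78StepA a) (cs.foldl lz78StepB b) := by
  induction cs generalizing a b with
  | nil => exact h
  | cons c cs ih => exact ih _ _ (lzStep_inv a b c h)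

lemma lzInit_inv :
    LZInv { d := PySem.Dict.ofList [([], 0)], size := 1, ibits := 1, bits := [], cur := [] }
          { trie := PySem.Dict.empty, nid := 1, ibits := 1, bits := [], node := 0, parent := 0, last := 'A' } := by
  have hc : ∀ p : List Char, (PySem.Dict.ofList [(([] : List Char), (0 : Int))]).contains p = (p == []) := by
    intro p
    show ((PySem.Dict.empty.insert [] 0).contains p) = _
    rw [PySem.Dict.contains_insert]; simp
  have hg : ∀ p : List Char, (PySem.Dict.ofList [(([] : List Char), (0 : Int))]).getD p 0 = 0 := by
    intro p
    show ((PySem.Dict.empty.insert [] 0).getD p 0) = _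
    rw [PySem.Dict.getD_insert]; simp [PySem.Dict.getD_empty]
  refine ⟨rfl, rfl, rfl, by simp [hc], by simp [hg], by simp, by simp [hc], by simp [hg],
    ?_, ?_, ?_, ?_, ?_⟩
  · intro p hp; rw [hg]
    exact ⟨le_refl 0, by show (0:Int) < 1; norm_num⟩
  · intro p q hp hq _
    rw [hc] at hp hq; simp at hp hq; rw [hp, hq]
  · intro p hp hpne
    rw [hc] at hp; simp at hp; exact absurd hp hpne
  · intro k hk; rw [PySem.Dict.contains_empty] at hk; exact absurd hk (by simp)
  · intro p c hp
    rw [hc] at hp; simp at hp; subst hp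
    constructor
    · rw [hc]; rw [PySem.Dict.contains_empty]; simp
    · intro hcont; rw [hc] at hcont; simp at hcont

-- ===== VERDICT (by name: the statement is the Claim_ definition above) =====
theorem lz78_encode_spec : Claim_equal_lz78_encode := by
  intro s _hdom
  unfold Spec_lz78_encode lz78_encode lz78_encode_alt
  have h := lzFoldl_inv s.toList _ _ lzInit_inv
  obtain ⟨hsz, hib, hbits, hcur, hnode, htail, hnil, hnil0, hbound, hinj, hpc, htb, hcorr⟩ := h
  set sa := s.toList.foldl lz78StepA
    { d := PySem.Dict.ofList [([], 0)], size := 1, ibits := 1, bits := [], cur := [] } with hsa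
  set sb := s.toList.foldl lz78StepB
    { trie := PySem.Dict.empty, nid := 1, ibits := 1, bits := [], node := 0, parent := 0, last := 'A' } with hsb
  by_cases hce : sa.cur = []
  · have hn0 : sb.node = 0 := by rw [← hnode, hce, hnil0]
    simp only [hce, hn0, ne_eq, not_true_eq_false, if_false, hbits]
  · have hn0 : sb.node ≠ 0 := by
      intro hn
      have h0 : sa.d.getD sa.cur 0 = sa.d.getD [] 0 := by rw [hnode, hn, hnil0]
      exact hce (hinj sa.cur [] hcur hnil h0)
    obtain ⟨hpar, hlast⟩ := htail hce
    obtain ⟨ys, y, hys⟩ : ∃ L b, sa.cur = L ++ [b] :=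
      ⟨sa.cur.dropLast, sa.cur.getLast hce, (List.dropLast_concat_getLast hce).symm⟩
    have hget : (PySem.List.pyGet? sa.cur (-1)).getD 'A' = y := by
      rw [hys, pyGet_concat_neg_one]; rfl
    have hy : y = sb.last := by
      rw [hys, List.getLast?_concat] at hlast
      exact Option.some.inj hlast
    have hdl : sa.cur.dropLast = ys := by rw [hys, List.dropLast_concat]
    simp only [ne_eq, hce, not_false_eq_true, hn0, if_pos]
    rw [hbits, hib, PySem.Chars.pyGet?_eq_listPyGet?, hget, hy,
      PySem.Chars.slice_eq_listSlice, PySem.List.slice_to_neg_one, hpar]
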